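-- pv_equiv track=rewrite | github.com/soundwow-ad/sec-manager | services_ragic_import.py | _material_titles_for_unit_seconds
-- ===== SOURCE A (Python) =====
-- def _material_titles_for_unit_seconds(rows: list[tuple[str, int | None]], unit_seconds: int) -> list[str]:
--     """依 CUE 單位秒數，篩選應拆分的素材篇名；無篇名時回傳單一空白。"""
--     typed = [(str(t).strip(), ps) for t, ps in rows]
--     non_empty = [(t, ps) for t, ps in typed if t]
--     if not non_empty:
--         return [""]
--     exact = [t for t, ps in non_empty if ps == unit_seconds]
--     if exact:
--         return exact
--     wild = [t for t, ps in non_empty if ps is None]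
--     if wild:
--         return wild
--     return [""]
-- ===== SOURCE B (Python) =====
-- def _material_titles_for_unit_seconds(rows: list[tuple[str, int | None]], unit_seconds: int) -> list[str]:
--     # argmin-with-ties: rank 0 = exact period match, rank 1 = wildcard (None);
--     # keep only the titles of the best rank seen so far, resetting on improvement.
--     best = 2
--     out: list[str] = []
--     for t, ps in rows:
--         t = str(t).strip()
--         if not t:
--             continue
--         r = 0 if ps == unit_seconds else (1 if ps is None else 2)
--         if r < best:
--             best = r
--             out = [t]
--         elif r == best and r < 2:
--             out.append(t)
--     return out if out else [""]
-- ===== Notes on version B (the rewrite author's own statement) =====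
-- stated objective: alternative
-- what changed: Replaces A's staged filtering (normalize, drop empties, try the exact list, then the wildcard list) by an argmin-with-ties single pass: each kept row is ranked (0 = exact period match, 1 = wildcard None), and one running answer list keeps only the titles of the best rank seen so far, resetting whenever a better rank appears; losing candidates are never stored.
import Mathlib
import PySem

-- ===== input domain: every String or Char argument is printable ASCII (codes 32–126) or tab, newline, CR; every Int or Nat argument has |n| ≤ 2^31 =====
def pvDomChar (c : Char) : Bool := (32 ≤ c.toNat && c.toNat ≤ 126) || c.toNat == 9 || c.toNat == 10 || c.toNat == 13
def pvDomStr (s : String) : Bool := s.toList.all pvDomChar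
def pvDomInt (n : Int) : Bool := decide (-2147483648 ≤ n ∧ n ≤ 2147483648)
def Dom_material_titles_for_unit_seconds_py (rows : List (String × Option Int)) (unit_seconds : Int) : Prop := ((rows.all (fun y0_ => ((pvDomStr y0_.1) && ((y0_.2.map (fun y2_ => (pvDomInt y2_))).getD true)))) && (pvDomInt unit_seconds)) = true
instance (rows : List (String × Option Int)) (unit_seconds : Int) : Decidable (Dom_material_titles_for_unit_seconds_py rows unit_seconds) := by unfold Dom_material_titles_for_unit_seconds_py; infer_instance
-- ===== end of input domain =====

-- B replaces A's staged filters by an argmin-with-ties single pass over ranked rows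
-- (0 = exact, 1 = wildcard), keeping one running list of best-rank titles; same value.


-- ===== PORT A =====
def material_titles_for_unit_seconds_py (rows : List (String × Option Int)) (unit_seconds : Int) : List String :=
  let typed := rows.map (fun r => (PySem.Str.strip r.1, r.2))
  let non_empty := typed.filter (fun r => r.1 ≠ "")
  if non_empty = [] then [""]
  else
    let exact := (non_empty.filter (fun r => r.2 = some unit_seconds)).map (fun r => r.1)
    if exact ≠ [] then exact
    else
      let wild := (non_empty.filter (fun r => r.2 = none)).map (fun r => r.1)
      if wild ≠ [] then wild
      else [""]

-- ===== PORT B =====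
-- state: (best rank so far, titles of that rank); rank 0 = exact, 1 = wildcard, 2 = none yet
def mtAltStep (u : Int) (acc : Nat × List String) (row : String × Option Int) :
    Nat × List String :=
  let t := PySem.Str.strip row.1
  if t = "" then acc
  else
    let r : Nat := if row.2 = some u then 0 else if row.2 = none then 1 else 2
    if r < acc.1 then (r, [t])
    else if r = acc.1 ∧ r < 2 then (acc.1, acc.2 ++ [t])
    else acc

def material_titles_for_unit_seconds_py_alt (rows : List (String × Option Int)) (unit_seconds : Int) : List String :=
  let acc := rows.foldl (mtAltStep unit_seconds) (2, [])
  if acc.2 ≠ [] then acc.2 else [""]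

-- ===== PRECONDITION & SPEC =====
def Spec_material_titles_for_unit_seconds_py (rows : List (String × Option Int)) (unit_seconds : Int) (out : List String) : Prop := out = material_titles_for_unit_seconds_py_alt rows unit_seconds
instance (rows : List (String × Option Int)) (unit_seconds : Int) (out : List String) : Decidable (Spec_material_titles_for_unit_seconds_py rows unit_seconds out) := by unfold Spec_material_titles_for_unit_seconds_py; infer_instance

-- ===== CLAIM (what is proved, stated in full; the proofs are below) =====
def Claim_equal_material_titles_for_unit_seconds_py : Prop := ∀ (rows : List (String × Option Int)) (unit_seconds : Int), Dom_material_titles_for_unit_seconds_py rows unit_seconds → Spec_material_titles_for_unit_seconds_py rows unit_seconds (material_titles_for_unit_seconds_py rows unit_seconds)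

-- ===== LEMMAS AND PROOFS =====

-- A's exact / wild lists as functions of the input, used as the fold invariant
def mtExact (rows : List (String × Option Int)) (u : Int) : List String :=
  (((rows.map (fun r => (PySem.Str.strip r.1, r.2))).filter (fun r => r.1 ≠ "")).filter
      (fun r => r.2 = some u)).map (fun r => r.1)

def mtWild (rows : List (String × Option Int)) : List String :=
  (((rows.map (fun r => (PySem.Str.strip r.1, r.2))).filter (fun r => r.1 ≠ "")).filter
      (fun r => r.2 = none)).map (fun r => r.1)

theorem mtExact_cons (u : Int) (r : String × Option Int) (rs : List (String × Option Int)) :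
    mtExact (r :: rs) u =
      if PySem.Str.strip r.1 = "" then mtExact rs u
      else if r.2 = some u then PySem.Str.strip r.1 :: mtExact rs u else mtExact rs u := by
  simp only [mtExact, List.map_cons, List.filter_cons]
  by_cases h1 : PySem.Str.strip r.1 = "" <;> by_cases h2 : r.2 = some u <;> simp [h1, h2]

theorem mtWild_cons (r : String × Option Int) (rs : List (String × Option Int)) :
    mtWild (r :: rs) =
      if PySem.Str.strip r.1 = "" then mtWild rs
      else if r.2 = none then PySem.Str.strip r.1 :: mtWild rs else mtWild rs := by
  simp only [mtWild, List.map_cons, List.filter_cons]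
  by_cases h1 : PySem.Str.strip r.1 = "" <;> by_cases h2 : r.2 = none <;> simp [h1, h2]

theorem mtFold0 (u : Int) (rows : List (String × Option Int)) (out : List String) :
    rows.foldl (mtAltStep u) (0, out) = (0, out ++ mtExact rows u) := by
  induction rows generalizing out with
  | nil => simp [mtExact]
  | cons r rs ih =>
    simp only [List.foldl_cons, mtAltStep, mtExact_cons]
    by_cases h1 : PySem.Str.strip r.1 = ""
    · simp [h1, ih]
    · by_cases h2 : r.2 = some u
      · simp [h1, h2, ih]
      · by_cases h3 : r.2 = none
        · simp [h1, h2, h3, ih]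
        · simp [h1, h2, h3, ih]

theorem mtFold1 (u : Int) (rows : List (String × Option Int)) (out : List String) :
    rows.foldl (mtAltStep u) (1, out) =
      if mtExact rows u = [] then (1, out ++ mtWild rows) else (0, mtExact rows u) := by
  induction rows generalizing out with
  | nil => simp [mtExact, mtWild]
  | cons r rs ih =>
    simp only [List.foldl_cons, mtAltStep, mtExact_cons, mtWild_cons]
    by_cases h1 : PySem.Str.strip r.1 = ""
    · simp [h1, ih]
    · by_cases h2 : r.2 = some u
      · simp [h1, h2, mtFold0]
      · by_cases h3 : r.2 = none
        · simp [h1, h3, ih]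
        · simp [h1, h2, h3, ih]

theorem mtFold2 (u : Int) (rows : List (String × Option Int)) (out : List String) :
    rows.foldl (mtAltStep u) (2, out) =
      if mtExact rows u = [] then
        (if mtWild rows = [] then (2, out) else (1, mtWild rows))
      else (0, mtExact rows u) := by
  induction rows generalizing out with
  | nil => simp [mtExact, mtWild]
  | cons r rs ih =>
    simp only [List.foldl_cons, mtAltStep, mtExact_cons, mtWild_cons]
    by_cases h1 : PySem.Str.strip r.1 = ""
    · simp [h1, ih]
    · by_cases h2 : r.2 = some u
      · simp [h1, h2, mtFold0]
      · by_cases h3 : r.2 = none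
        · simp [h1, h3, mtFold1]
        · simp [h1, h2, h3, ih]

-- ===== VERDICT (by name: the statement is the Claim_ definition above) =====
theorem material_titles_for_unit_seconds_py_spec : Claim_equal_material_titles_for_unit_seconds_py := by
  intro rows u _
  show material_titles_for_unit_seconds_py rows u = material_titles_for_unit_seconds_py_alt rows u
  unfold material_titles_for_unit_seconds_py material_titles_for_unit_seconds_py_alt
  show (if (rows.map (fun r => (PySem.Str.strip r.1, r.2))).filter (fun r => r.1 ≠ "") = []
        then [""]
        else if mtExact rows u ≠ [] then mtExact rows u
        else if mtWild rows ≠ [] then mtWild rows else [""]) = _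
  rw [mtFold2]
  by_cases hne : (rows.map (fun r => (PySem.Str.strip r.1, r.2))).filter (fun r => r.1 ≠ "") = []
  · have he : mtExact rows u = [] := by unfold mtExact; rw [hne]; rfl
    have hw : mtWild rows = [] := by unfold mtWild; rw [hne]; rfl
    rw [if_pos hne, he, hw]
    simp
  · rw [if_neg hne]
    by_cases he : mtExact rows u = []
    · by_cases hw : mtWild rows = [] <;> simp [he, hw]
    · simp [he]
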